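-- pv_equiv track=rewrite | github.com/andifg/Advent_of_Code_Solver | adventofcode/logic/transformer/transfomerstrategy.py | do_transformation
-- ===== SOURCE A (Python) =====
-- from typing import List
--
-- def do_transformation(data: List) -> List[List[int]]:
--     new_list: List[List[int]] = []
--     current_list: List[int] = []
--     for i,item in enumerate(data):
--         if item == "":
--             new_list.append(current_list)
--             current_list = []
--         elif i == len(data)-1:
--             current_list.append(int(item))
--             new_list.append(current_list)
--         else:
--             current_list.append(int(item))
--
--     return new_list
-- ===== SOURCE B (Python) =====
-- def do_transformation(data):
--     result = []
--     start = 0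
--     for i, item in enumerate(data):
--         if item == "":
--             result.append([int(x) for x in data[start:i]])
--             start = i + 1
--     if start < len(data):
--         result.append([int(x) for x in data[start:]])
--     return result
-- ===== Notes on version B (the rewrite author's own statement) =====
-- stated objective: alternative
-- what changed: B tracks only a running start index and slices out each delimiter-bounded segment at once (converting it with one comprehension), instead of A's per-element accumulator list with a special last-index branch.
import Mathlib
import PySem

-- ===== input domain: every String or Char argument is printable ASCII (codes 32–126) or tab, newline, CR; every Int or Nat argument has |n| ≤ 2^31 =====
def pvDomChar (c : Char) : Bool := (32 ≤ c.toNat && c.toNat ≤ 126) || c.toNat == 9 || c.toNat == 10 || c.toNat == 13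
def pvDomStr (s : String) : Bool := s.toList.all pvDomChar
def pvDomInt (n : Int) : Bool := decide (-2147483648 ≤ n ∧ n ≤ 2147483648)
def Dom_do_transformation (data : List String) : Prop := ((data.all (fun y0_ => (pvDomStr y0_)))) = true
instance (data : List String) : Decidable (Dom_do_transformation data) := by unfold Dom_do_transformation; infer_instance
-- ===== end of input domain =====

-- B keeps a running start index and slices out whole segments between "" delimiters instead of A's per-element accumulator; same O(n) cost, different decomposition.


-- int(item); total here, Pre_ guarantees parsing succeeds on every non-empty item
def pvParse (s : String) : Int := (PySem.Int.ofStr? s).getD 0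

-- ===== PORT A =====
-- the 'for i,item in enumerate(data)' loop, state = (new_list, current_list)
def doTransLoopA : List (Int × String) → List String → List (List Int) → List Int → List (List Int)
  | [], _data, newList, _cur => newList
  | (i, item) :: rest, data, newList, cur =>
    if item = "" then
      doTransLoopA rest data (newList ++ [cur]) []
    else if i = (data.length : Int) - 1 then
      doTransLoopA rest data (newList ++ [cur ++ [pvParse item]]) (cur ++ [pvParse item])
    else
      doTransLoopA rest data newList (cur ++ [pvParse item])

def do_transformation (data : List String) : List (List Int) :=
  doTransLoopA (PySem.List.enumerate data 0) data [] []

-- ===== PORT B =====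
-- the 'for i,item in enumerate(data)' loop, state = (result, start)
def doTransLoopB : List (Int × String) → List String → List (List Int) → Int → (List (List Int) × Int)
  | [], _data, res, start => (res, start)
  | (i, item) :: rest, data, res, start =>
    if item = "" then
      doTransLoopB rest data (res ++ [(PySem.List.slice data (some start) (some i)).map pvParse]) (i + 1)
    else
      doTransLoopB rest data res start

def do_transformation_alt (data : List String) : List (List Int) :=
  let p := doTransLoopB (PySem.List.enumerate data 0) data [] 0
  if p.2 < (data.length : Int) then
    p.1 ++ [(PySem.List.slice data (some p.2) none).map pvParse]
  else p.1

-- ===== PRECONDITION & SPEC =====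
-- A calls int(item) on every non-empty item and raises ValueError when it does not parse; exactly those inputs are excluded.
def Pre_do_transformation (data : List String) : Prop :=
  ∀ s ∈ data, s ≠ "" → (PySem.Int.ofStr? s).isSome = true
instance (data : List String) : Decidable (Pre_do_transformation data) := by
  unfold Pre_do_transformation; infer_instance
def pvWitness_do_transformation : List String := ["12", "0", "", "-3", "4", ""]

def Spec_do_transformation (data : List String) (out : List (List Int)) : Prop := out = do_transformation_alt data
instance (data : List String) (out : List (List Int)) : Decidable (Spec_do_transformation data out) := by unfold Spec_do_transformation; infer_instance

-- ===== CLAIM (what is proved, stated in full; the proofs are below) =====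
def Claim_equal_do_transformation : Prop := ∀ (data : List String), Dom_do_transformation data → Pre_do_transformation data → Spec_do_transformation data (do_transformation data)

-- ===== LEMMAS AND PROOFS =====

lemma loops_agree (tail : List String) :
    ∀ (i : Nat) (data : List String) (newList : List (List Int)) (cur : List Int) (start : Nat),
    i + tail.length = data.length →
    data.drop i = tail →
    start ≤ i →
    cur = ((data.drop start).take (i - start)).map pvParse →
    (tail = [] → start = i) →
    doTransLoopA (PySem.List.enumerate tail (i : Int)) data newList cur
      = (let p := doTransLoopB (PySem.List.enumerate tail (i : Int)) data newList (start : Int)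
         if p.2 < (data.length : Int) then
           p.1 ++ [(PySem.List.slice data (some p.2) none).map pvParse]
         else p.1) := by
  induction tail with
  | nil =>
    intro i data newList cur start hlen hdrop hle hcur hnil
    have : start = i := hnil rfl
    subst this
    simp at hlen
    simp [PySem.List.enumerate_nil, doTransLoopA, doTransLoopB, hlen]
  | cons item rest ih =>
    intro i data newList cur start hlen hdrop hle hcur hnil
    simp only [List.length_cons] at hlen
    have hdrop1 : data.drop (i + 1) = rest := by
      have h1 := congrArg (List.drop 1) hdrop
      rw [List.drop_drop] at h1
      simpa using h1
    rw [PySem.List.enumerate_cons]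
    by_cases hempty : item = ""
    · -- delimiter: A flushes cur, B flushes the slice data[start:i]
      have hslice : (PySem.List.slice data (some (start : Int)) (some (i : Int))).map pvParse = cur := by
        rw [PySem.List.slice_natCast, hcur]
      simp only [doTransLoopA, doTransLoopB, hempty, hslice]
      have := ih (i + 1) data (newList ++ [cur]) [] (i + 1)
        (by omega) hdrop1 le_rfl (by simp) (fun _ => rfl)
      push_cast at this ⊢
      exact this
    · by_cases hlast : (i : Int) = (data.length : Int) - 1
      · -- last element, non-empty: rest = [], both loops end here
        have hrest : rest = [] := by
          have : rest.length = 0 := by omega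
          exact List.eq_nil_of_length_eq_zero this
        subst hrest
        have hslt : (start : Int) < (data.length : Int) := by
          have : start < data.length := by omega
          exact_mod_cast this
        have htailmap : (data.drop start).map pvParse = cur ++ [pvParse item] := by
          have hsplit : data.drop start
              = (data.drop start).take (i - start) ++ (data.drop start).drop (i - start) := by
            simp
          have hdd : (data.drop start).drop (i - start) = [item] := by
            rw [List.drop_drop]
            have h2 : start + (i - start) = i := by omega
            rw [h2, hdrop]
          rw [hsplit, hdd, List.map_append, ← hcur, List.map_cons, List.map_nil]
        simp only [doTransLoopA, doTransLoopB, hempty, if_pos hlast,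
          PySem.List.enumerate_nil]
        simp [hslt, PySem.List.slice_from_natCast, htailmap]
      · -- middle non-empty element: A extends cur, B's state is unchanged
        have hrestne : rest ≠ [] := by
          intro h
          subst h
          simp at hlen
          omega
        have hcur' : cur ++ [pvParse item]
            = ((data.drop start).take (i + 1 - start)).map pvParse := by
          have hstep : i + 1 - start = (i - start) + 1 := by omega
          have hget : (data.drop start)[i - start]? = some item := by
            rw [← List.head?_drop, List.drop_drop]
            have h2 : start + (i - start) = i := by omega
            rw [h2, hdrop]
            rfl
          rw [hstep, List.take_add_one, hget, hcur, List.map_append]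
          rfl
        simp only [doTransLoopA, doTransLoopB, if_neg hempty, if_neg hlast]
        have := ih (i + 1) data newList (cur ++ [pvParse item]) start
          (by omega) hdrop1 (by omega) hcur' (fun h => absurd h hrestne)
        push_cast at this ⊢
        exact this

theorem do_transformation_spec : Claim_equal_do_transformation := by
  intro data _hdom _hpre
  unfold Spec_do_transformation do_transformation do_transformation_alt
  have := loops_agree data 0 data [] [] 0 (by simp) (by simp) le_rfl (by simp) (fun h => rfl)
  simpa using this
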